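-- pv_equiv track=rewrite | github.com/Medhasakthi/MEDHASAKTHI | backend/app/core/performance.py | _predict_improvement
-- ===== SOURCE A (Python) =====
-- from typing import Any, Dict, List, Optional, Callable
--
-- def _predict_improvement(optimizations: List[Dict[str, Any]]) -> Dict[str, float]:
--     """Predict performance improvement from optimizations"""
--     # Simplified prediction model
--     improvements = {
--         "response_time_reduction_percent": 0,
--         "cache_hit_rate_increase_percent": 0,
--         "memory_usage_reduction_percent": 0
--     }
--
--     for opt in optimizations:
--         if opt["type"] == "response_time":
--             improvements["response_time_reduction_percent"] += 15
--         elif opt["type"] == "cache_optimization":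
--             improvements["cache_hit_rate_increase_percent"] += 10
--         elif opt["type"] == "memory_optimization":
--             improvements["memory_usage_reduction_percent"] += 20
--
--     return improvements
-- ===== SOURCE B (Python) =====
-- def _predict_improvement(optimizations):
--     """Predict improvement: project out the type tags, then three independent
--     .count scans with fixed weights (no explicit loop, no accumulator)."""
--     types = [opt["type"] for opt in optimizations]
--     return {
--         "response_time_reduction_percent": 15 * types.count("response_time"),
--         "cache_hit_rate_increase_percent": 10 * types.count("cache_optimization"),
--         "memory_usage_reduction_percent": 20 * types.count("memory_optimization"),
--     }
-- ===== Notes on version B (the rewrite author's own statement) =====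
-- stated objective: simpler
-- what changed: B removes A's single accumulate-with-branches loop over a mutable result dict entirely: it projects the list of type tags once, then builds the result dict in closed form from three independent list.count scans times the fixed weights 15/10/20.
import Mathlib
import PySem

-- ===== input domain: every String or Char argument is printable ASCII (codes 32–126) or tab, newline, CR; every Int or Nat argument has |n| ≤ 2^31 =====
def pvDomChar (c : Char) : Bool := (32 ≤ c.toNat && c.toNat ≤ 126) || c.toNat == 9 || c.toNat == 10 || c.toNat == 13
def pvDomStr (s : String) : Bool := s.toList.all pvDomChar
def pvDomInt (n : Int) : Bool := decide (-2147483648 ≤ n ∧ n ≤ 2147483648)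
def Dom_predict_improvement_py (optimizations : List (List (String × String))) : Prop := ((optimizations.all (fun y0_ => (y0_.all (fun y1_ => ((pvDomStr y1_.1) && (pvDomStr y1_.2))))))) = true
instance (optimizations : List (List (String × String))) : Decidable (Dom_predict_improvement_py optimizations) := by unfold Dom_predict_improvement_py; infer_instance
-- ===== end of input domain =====

-- B removes A's accumulate-with-branches loop: it projects the type tags once and
-- builds the result dict in closed form from three independent count scans (simpler).
-- ===== PORT A =====
-- opt["type"]: under Pre_ every opt contains the key "type", so getD with a dummy
-- default is exact there (Python raises KeyError on a missing key; Pre_ excludes that).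
def pvTypeOf (opt : List (String × String)) : String :=
  (PySem.Dict.ofList opt).getD "type" ""

def pvStepA (d : PySem.Dict String Int) (opt : List (String × String)) : PySem.Dict String Int :=
  if pvTypeOf opt == "response_time" then
    d.modify "response_time_reduction_percent" 0 (· + 15)
  else if pvTypeOf opt == "cache_optimization" then
    d.modify "cache_hit_rate_increase_percent" 0 (· + 10)
  else if pvTypeOf opt == "memory_optimization" then
    d.modify "memory_usage_reduction_percent" 0 (· + 20)
  else d

def predict_improvement_py (optimizations : List (List (String × String))) : List (String × Int) :=
  let improvements : PySem.Dict String Int :=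
    PySem.Dict.ofList
      [("response_time_reduction_percent", 0),
       ("cache_hit_rate_increase_percent", 0),
       ("memory_usage_reduction_percent", 0)]
  (optimizations.foldl pvStepA improvements).items

-- ===== PORT B =====
-- B: project the "type" tags, then three independent count scans with fixed weights.
def pvTypeOfB (opt : List (String × String)) : String :=
  (PySem.Dict.ofList opt).getD "type" ""

def predict_improvement_py_alt (optimizations : List (List (String × String))) : List (String × Int) :=
  let types : List String := optimizations.map pvTypeOfB
  [("response_time_reduction_percent", 15 * (PySem.List.count types "response_time" : Int)),
   ("cache_hit_rate_increase_percent", 10 * (PySem.List.count types "cache_optimization" : Int)),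
   ("memory_usage_reduction_percent", 20 * (PySem.List.count types "memory_optimization" : Int))]

-- ===== PRECONDITION & SPEC =====
-- Pre_ excludes exactly the inputs where some optimization dict lacks the key "type":
-- there the Python A (and B) raises KeyError.
def Pre_predict_improvement_py (optimizations : List (List (String × String))) : Prop :=
  ∀ opt ∈ optimizations, "type" ∈ opt.map Prod.fst
instance (optimizations : List (List (String × String))) : Decidable (Pre_predict_improvement_py optimizations) := by unfold Pre_predict_improvement_py; infer_instance

def pvWitness_predict_improvement_py : (List (List (String × String))) :=
  [[("type", "response_time")], [("type", "cache_optimization")], [("type", "other")]]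

def Spec_predict_improvement_py (optimizations : List (List (String × String))) (out : List (String × Int)) : Prop := out = predict_improvement_py_alt optimizations
instance (optimizations : List (List (String × String))) (out : List (String × Int)) : Decidable (Spec_predict_improvement_py optimizations out) := by unfold Spec_predict_improvement_py; infer_instance

-- ===== CLAIM (what is proved, stated in full; the proofs are below) =====
def Claim_equal_predict_improvement_py : Prop := ∀ (optimizations : List (List (String × String))), Dom_predict_improvement_py optimizations → Pre_predict_improvement_py optimizations → Spec_predict_improvement_py optimizations (predict_improvement_py optimizations)

-- ===== LEMMAS AND PROOFS =====

def pvK1 : String := "response_time_reduction_percent"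
def pvK2 : String := "cache_hit_rate_increase_percent"
def pvK3 : String := "memory_usage_reduction_percent"

lemma pvStepA_getD (d : PySem.Dict String Int) (opt : List (String × String)) (k : String)
    (hk : k = pvK1 ∨ k = pvK2 ∨ k = pvK3) :
    (pvStepA d opt).getD k 0 = d.getD k 0 +
      (if pvTypeOf opt = "response_time" ∧ k = pvK1 then 15
       else if pvTypeOf opt = "cache_optimization" ∧ k = pvK2 then 10
       else if pvTypeOf opt = "memory_optimization" ∧ k = pvK3 then 20
       else 0) := by
  unfold pvStepA
  rcases hk with h | h | h <;> subst h <;>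
    split_ifs with h1 h2 h3 <;>
    simp_all [PySem.Dict.getD_modify, pvK1, pvK2, pvK3]

lemma pvLoop_getD (l : List (List (String × String))) (d : PySem.Dict String Int)
    (k : String) (hk : k = pvK1 ∨ k = pvK2 ∨ k = pvK3) :
    (l.foldl pvStepA d).getD k 0 = d.getD k 0 +
      (if k = pvK1 then 15 * ((l.map pvTypeOf).count "response_time" : Int)
       else if k = pvK2 then 10 * ((l.map pvTypeOf).count "cache_optimization" : Int)
       else 20 * ((l.map pvTypeOf).count "memory_optimization" : Int)) := by
  induction l generalizing d with
  | nil =>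
      rcases hk with h | h | h <;> subst h <;>
        simp [pvK1, pvK2, pvK3]
  | cons a l ih =>
      simp only [List.foldl_cons]
      rw [ih (pvStepA d a), pvStepA_getD d a k hk]
      have h12 : pvK1 ≠ pvK2 := by decide
      have h13 : pvK1 ≠ pvK3 := by decide
      have h23 : pvK2 ≠ pvK3 := by decide
      have h21 : pvK2 ≠ pvK1 := by decide
      have h31 : pvK3 ≠ pvK1 := by decide
      have h32 : pvK3 ≠ pvK2 := by decide
      rcases hk with h | h | h <;> subst h <;>
        by_cases hrt : pvTypeOf a = "response_time" <;>
        by_cases hco : pvTypeOf a = "cache_optimization" <;>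
        by_cases hmo : pvTypeOf a = "memory_optimization" <;>
        simp_all <;> omega

lemma pvLoop_keys (l : List (List (String × String))) (d : PySem.Dict String Int)
    (h1 : d.contains pvK1 = true) (h2 : d.contains pvK2 = true) (h3 : d.contains pvK3 = true) :
    (l.foldl pvStepA d).keys = d.keys := by
  induction l generalizing d with
  | nil => rfl
  | cons a l ih =>
      simp only [List.foldl_cons]
      have hkeys : (pvStepA d a).keys = d.keys := by
        unfold pvStepA
        split_ifs
        · rw [PySem.Dict.keys_modify,
              PySem.Dict.keys_insert_of_contains _ _
                (show d.contains "response_time_reduction_percent" = true from h1)]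
        · rw [PySem.Dict.keys_modify,
              PySem.Dict.keys_insert_of_contains _ _
                (show d.contains "cache_hit_rate_increase_percent" = true from h2)]
        · rw [PySem.Dict.keys_modify,
              PySem.Dict.keys_insert_of_contains _ _
                (show d.contains "memory_usage_reduction_percent" = true from h3)]
        · rfl
      have hc : ∀ k, (pvStepA d a).contains k = d.contains k := by
        intro k
        rw [PySem.Dict.contains_eq_decide_mem_keys, PySem.Dict.contains_eq_decide_mem_keys, hkeys]
      rw [ih _ (by rw [hc]; exact h1) (by rw [hc]; exact h2) (by rw [hc]; exact h3), hkeys]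

-- ===== VERDICT (by name: the statement is the Claim_ definition above) =====
theorem predict_improvement_py_spec : Claim_equal_predict_improvement_py := by
  intro optimizations _ _
  unfold Spec_predict_improvement_py predict_improvement_py predict_improvement_py_alt
  have hkeys : (optimizations.foldl pvStepA
      (PySem.Dict.ofList
        [("response_time_reduction_percent", (0 : Int)),
         ("cache_hit_rate_increase_percent", 0),
         ("memory_usage_reduction_percent", 0)])).keys = [pvK1, pvK2, pvK3] := by
    rw [pvLoop_keys _ _ (by decide) (by decide) (by decide)]; rfl
  have hnd : (optimizations.foldl pvStepA
      (PySem.Dict.ofList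
        [("response_time_reduction_percent", (0 : Int)),
         ("cache_hit_rate_increase_percent", 0),
         ("memory_usage_reduction_percent", 0)])).keys.Nodup := by rw [hkeys]; decide
  rw [PySem.Dict.items_eq_map_keys _ hnd 0, hkeys]
  simp only [List.map_cons, List.map_nil]
  rw [pvLoop_getD _ _ pvK1 (Or.inl rfl), pvLoop_getD _ _ pvK2 (Or.inr (Or.inl rfl)),
      pvLoop_getD _ _ pvK3 (Or.inr (Or.inr rfl))]
  rw [if_pos rfl, if_neg (show ¬ pvK2 = pvK1 by decide), if_neg (show ¬ pvK3 = pvK1 by decide),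
      if_neg (show ¬ pvK3 = pvK2 by decide)]
  rw [show (PySem.Dict.ofList
        [("response_time_reduction_percent", (0 : Int)),
         ("cache_hit_rate_increase_percent", 0),
         ("memory_usage_reduction_percent", 0)]).getD pvK1 0 = 0 from by decide,
      show (PySem.Dict.ofList
        [("response_time_reduction_percent", (0 : Int)),
         ("cache_hit_rate_increase_percent", 0),
         ("memory_usage_reduction_percent", 0)]).getD pvK2 0 = 0 from by decide,
      show (PySem.Dict.ofList
        [("response_time_reduction_percent", (0 : Int)),
         ("cache_hit_rate_increase_percent", 0),
         ("memory_usage_reduction_percent", 0)]).getD pvK3 0 = 0 from by decide,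
      zero_add, zero_add, zero_add]
  rw [if_pos rfl]
  simp only [PySem.List.count_eq]
  rfl
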